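-- pv_equiv track=rewrite | github.com/cesarau04/basesdedatos-practica4 | master.py | fragmenter
-- ===== SOURCE A (Python) =====
-- def fragmenter(file):
--     ans=[]
--     size=int(len(file)/3)
--     residuo=len(file)%3
--     inc=0
--     ant=0
--     for i in range(3):
--         ant=inc
--         if(residuo!=0):
--             inc+=1
--             residuo-=1
--         ans.append(file[size*i+ant:size*(i+1)+inc])
--     return ans
-- ===== SOURCE B (Python) =====
-- def fragmenter(file):
--     # Recursive peeling: take the ceiling-sized head chunk for the k chunks
--     # that remain, then recurse on the rest. Extra chars land in the first
--     # chunks because ceil((n)/k) removes the remainder front-first.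
--     def go(start, k):
--         if k == 0:
--             return []
--         cut = start + -(-(len(file) - start) // k)
--         return [file[start:cut]] + go(cut, k - 1)
--     return go(0, 3)
-- ===== Notes on version B (the rewrite author's own statement) =====
-- stated objective: alternative
-- what changed: Replaces A's 3-iteration loop threading inc/ant/residuo accumulators with recursive peeling: while k chunks remain, cut off a ceiling-sized head chunk of ceil(remaining/k) characters and recurse on the rest.
import Mathlib
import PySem

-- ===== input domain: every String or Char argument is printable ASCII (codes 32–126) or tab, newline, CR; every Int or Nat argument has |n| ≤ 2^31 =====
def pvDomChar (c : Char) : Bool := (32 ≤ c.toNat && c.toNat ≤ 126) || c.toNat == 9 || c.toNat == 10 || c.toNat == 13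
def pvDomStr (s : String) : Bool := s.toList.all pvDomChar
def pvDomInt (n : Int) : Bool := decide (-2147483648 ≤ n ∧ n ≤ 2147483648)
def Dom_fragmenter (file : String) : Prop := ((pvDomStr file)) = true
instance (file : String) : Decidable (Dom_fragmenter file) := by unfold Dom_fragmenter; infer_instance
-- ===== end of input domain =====

-- B replaces A's 3-step accumulator loop by recursive peeling: while k chunks
-- remain, cut off a ceiling-sized head chunk ceil(rest/k) and recurse; same
-- output by a head-recursive decomposition instead of an index loop.

-- ===== PORT A =====
-- int(len(file)/3): float true division then truncation; equals len(file)//3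
-- exactly whenever 0 ≤ len(file) (the float quotient is exact enough below 2^53),
-- so it is ported as floor division by the positive literal 3.
def fragmenter (file : String) : List String :=
  let size := PySem.Int.floordiv (PySem.Str.len file) 3
  let residuo := PySem.Int.mod (PySem.Str.len file) 3
  let st := (PySem.List.pyRange 0 3 1).foldl
    (fun (s : List String × Int × Int × Int) i =>
      let ans := s.1
      let inc := s.2.1
      let residuo := s.2.2.2
      let ant := inc
      let inc := if residuo ≠ 0 then inc + 1 else inc
      let residuo := if residuo ≠ 0 then residuo - 1 else residuo
      (ans ++ [PySem.Str.slice file (some (size * i + ant)) (some (size * (i + 1) + inc))],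
       inc, ant, residuo))
    ([], 0, 0, residuo)
  st.1

-- ===== PORT B =====
-- go(start, k): Python recurses on k down to 0; ported with the count as the
-- structural Nat argument. -(-(m) // k) is ceiling division, ported literally
-- via floordiv of the negation.
def fragmenterGo (file : String) (start : Int) : Nat → List String
  | 0 => []
  | Nat.succ k =>
    let cut := start + -(PySem.Int.floordiv (-(PySem.Str.len file - start)) ((k : Int) + 1))
    PySem.Str.slice file (some start) (some cut) :: fragmenterGo file cut k

def fragmenter_alt (file : String) : List String :=
  fragmenterGo file 0 3

-- ===== PRECONDITION & SPEC =====
def Spec_fragmenter (file : String) (out : List String) : Prop := out = fragmenter_alt file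
instance (file : String) (out : List String) : Decidable (Spec_fragmenter file out) := by unfold Spec_fragmenter; infer_instance

-- ===== CLAIM =====
def Claim_equal_fragmenter : Prop := ∀ (file : String), Dom_fragmenter file → Spec_fragmenter file (fragmenter file)

-- ===== LEMMAS AND PROOFS =====
theorem fragmenter_eq_alt (file : String) : fragmenter file = fragmenter_alt file := by
  have hlen : PySem.Str.len file = (file.length : Int) := by
    simp [PySem.Str.len_eq]
  have hdiv : ∀ a : Int, PySem.Int.floordiv a 3 = a / 3 :=
    fun a => PySem.Int.floordiv_eq_ediv_of_pos (by norm_num)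
  have hmod : ∀ a : Int, PySem.Int.mod a 3 = a % 3 :=
    fun a => PySem.Int.mod_eq_emod_of_pos (by norm_num)
  simp only [fragmenter, fragmenter_alt, fragmenterGo, PySem.List.pyRange,
    hlen, hdiv, hmod]
  norm_num [List.range_succ]
  set n : Int := (file.length : Int) with hn
  have hnn : 0 ≤ n := by positivity
  have h3 : n % 3 = 0 ∨ n % 3 = 1 ∨ n % 3 = 2 := by omega
  rcases h3 with h | h | h <;>
    simp only [h] <;>
    simp [List.range_succ] <;>
    refine ⟨?_, ?_, ?_⟩ <;>
    (congr 1 <;> simp only [Option.some.injEq] <;> omega)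

-- ===== VERDICT =====
theorem fragmenter_spec : Claim_equal_fragmenter := by
  intro file _
  exact fragmenter_eq_alt file
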